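-- pv_equiv track=rewrite | github.com/clindoso/clindoso-gpt-translation-test | gpt-project/_data/scripts/old_translation_with_aligner.py | extract_translated_text
-- ===== SOURCE A (Python) =====
-- def extract_translated_text(translated_segments):
--     # Initialize marker count
--     marker_count = 0
--     for _, target_segments in translated_segments:
--         # Ignore segments while the end of the frontmatter is not found
--         if target_segments == "---":
--             marker_count += 1
--             if marker_count < 2:
--                 continue # Skip until the second '---' is found
--         # Start yielding segments after second '---' is found
--         if target_segments == "---" and marker_count >= 2:
--             continue
--         elif marker_count >= 2:
--             yield target_segments
-- ===== SOURCE B (Python) =====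
-- def extract_translated_text(translated_segments):
--     it = iter(translated_segments)
--     # Phase 1: skip the frontmatter header up to (and including) the second '---'
--     count = 0
--     for _, target in it:
--         if target == "---":
--             count += 1
--             if count == 2:
--                 break
--     # Phase 2: stream the body, dropping any further '---' markers
--     for _, seg in it:
--         if seg != "---":
--             yield seg
-- ===== Notes on version B (the rewrite author's own statement) =====
-- stated objective: simpler
-- what changed: Replaced the single self-filtering counting pass (marker counter consulted on every segment) by a two-phase decomposition: one loop consumes the shared iterator until the second '---' marker, a second loop streams the remaining segments filtering out '---'.
import Mathlib
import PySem

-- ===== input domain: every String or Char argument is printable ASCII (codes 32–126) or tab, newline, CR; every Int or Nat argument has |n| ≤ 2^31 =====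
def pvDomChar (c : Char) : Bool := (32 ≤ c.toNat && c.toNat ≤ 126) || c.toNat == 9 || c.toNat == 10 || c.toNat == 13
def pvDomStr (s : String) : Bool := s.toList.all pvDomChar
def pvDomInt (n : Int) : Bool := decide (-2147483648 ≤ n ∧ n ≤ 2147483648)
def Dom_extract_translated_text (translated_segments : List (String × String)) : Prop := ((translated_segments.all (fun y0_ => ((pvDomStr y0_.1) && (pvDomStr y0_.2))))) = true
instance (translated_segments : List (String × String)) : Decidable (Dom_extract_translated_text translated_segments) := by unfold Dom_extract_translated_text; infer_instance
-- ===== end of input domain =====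

-- B replaces A's single self-filtering counting pass by a two-phase skip-header / stream-body decomposition (objective: simpler).

-- ===== PORT A =====
-- A is a generator: one pass with a marker counter, yielding only when marker_count >= 2 and the segment is not '---'.
def extract_translated_text (translated_segments : List (String × String)) : List String :=
  (translated_segments.foldl
    (fun (st : Int × List String) p =>
      if p.2 == "---" then
        if st.1 + 1 < 2 then (st.1 + 1, st.2)        -- continue: skip until second '---'
        else (st.1 + 1, st.2)                        -- p.2 == '---' and count >= 2: continue
      else if st.1 ≥ 2 then (st.1, st.2 ++ [p.2])    -- yield
      else (st.1, st.2))
    (0, [])).2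

-- ===== PORT B =====
-- Phase 1: consume pairs until the second '---' (returns the remaining segments; [] if fewer than two markers).
def pvSkipHeader : List (String × String) → Int → List (String × String)
  | [], _ => []
  | (_, t) :: rest, c =>
      if t == "---" then
        if c + 1 == 2 then rest else pvSkipHeader rest (c + 1)
      else pvSkipHeader rest c

-- Phase 2: stream the body, dropping '---' markers.
def pvStreamBody : List (String × String) → List String
  | [] => []
  | (_, s) :: rest => if s != "---" then s :: pvStreamBody rest else pvStreamBody rest

def extract_translated_text_alt (translated_segments : List (String × String)) : List String :=
  pvStreamBody (pvSkipHeader translated_segments 0)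

-- ===== PRECONDITION & SPEC =====
def Spec_extract_translated_text (translated_segments : List (String × String)) (out : List String) : Prop := out = extract_translated_text_alt translated_segments
instance (translated_segments : List (String × String)) (out : List String) : Decidable (Spec_extract_translated_text translated_segments out) := by unfold Spec_extract_translated_text; infer_instance

-- ===== CLAIM (what is proved, stated in full; the proofs are below) =====
def Claim_equal_extract_translated_text : Prop := ∀ (translated_segments : List (String × String)), Dom_extract_translated_text translated_segments → Spec_extract_translated_text translated_segments (extract_translated_text translated_segments)

-- ===== LEMMAS AND PROOFS =====

-- Tail contribution of A's fold from a given marker count.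
def pvGoA : List (String × String) → Int → List String
  | [], _ => []
  | (_, t) :: rest, mc =>
      if t == "---" then pvGoA rest (mc + 1)
      else if mc ≥ 2 then t :: pvGoA rest mc
      else pvGoA rest mc

theorem pvFoldA_snd (xs : List (String × String)) (mc : Int) (out : List String) :
    (xs.foldl
      (fun (st : Int × List String) p =>
        if p.2 == "---" then
          if st.1 + 1 < 2 then (st.1 + 1, st.2)
          else (st.1 + 1, st.2)
        else if st.1 ≥ 2 then (st.1, st.2 ++ [p.2])
        else (st.1, st.2))
      (mc, out)).2 = out ++ pvGoA xs mc := by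
  induction xs generalizing mc out with
  | nil => simp [pvGoA]
  | cons p rest ih =>
      obtain ⟨_, t⟩ := p
      simp only [List.foldl]
      by_cases h : t == "---"
      · simp only [h, if_true]
        split_ifs <;> rw [ih] <;> simp [pvGoA, h]
      · simp only [h, Bool.false_eq_true, if_false]
        split_ifs with hmc <;> rw [ih] <;> simp [pvGoA, h, hmc]

-- Once mc ≥ 2, A's tail just filters out '---'.
theorem pvGoA_ge_two (xs : List (String × String)) (mc : Int) (h : mc ≥ 2) :
    pvGoA xs mc = pvStreamBody xs := by
  induction xs generalizing mc with
  | nil => simp [pvGoA, pvStreamBody]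
  | cons p rest ih =>
      obtain ⟨_, t⟩ := p
      by_cases ht : t == "---"
      · have ht' : t = "---" := by simpa using ht
        simp only [pvGoA, pvStreamBody, ht', bne_self_eq_false, Bool.false_eq_true, if_false]
        exact ih (mc + 1) (by omega)
      · have ht' : ¬ t = "---" := by simpa using ht
        simp [pvGoA, pvStreamBody, ht, ht', h, ih mc h]

-- While mc < 2, A's tail equals B's skip-then-stream.
theorem pvGoA_lt_two (xs : List (String × String)) (mc : Int) (h : mc < 2) :
    pvGoA xs mc = pvStreamBody (pvSkipHeader xs mc) := by
  induction xs generalizing mc with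
  | nil => simp [pvGoA, pvSkipHeader, pvStreamBody]
  | cons p rest ih =>
      obtain ⟨_, t⟩ := p
      by_cases ht : t == "---"
      · by_cases h2 : mc + 1 = 2
        · have ht' : t = "---" := by simpa using ht
          simp [pvGoA, pvSkipHeader, ht', h2]
          exact h2 ▸ pvGoA_ge_two rest (mc + 1) (by omega)
        · have : (mc + 1 == 2) = false := by simp [h2]
          simp [pvGoA, pvSkipHeader, ht, this]
          exact ih (mc + 1) (by omega)
      · have : ¬ mc ≥ 2 := by omega
        simp [pvGoA, pvSkipHeader, ht, this, ih mc h]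

-- ===== VERDICT (by name: the statement is the Claim_ definition above) =====
theorem extract_translated_text_spec : Claim_equal_extract_translated_text := by
  intro xs _
  unfold Spec_extract_translated_text extract_translated_text extract_translated_text_alt
  rw [pvFoldA_snd]
  simpa using pvGoA_lt_two xs 0 (by omega)
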